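-- pv_equiv track=rewrite | github.com/hil6626/yl-ar-dgn_clean | YL-monitor/app/frontend/render_optimizer.py | generate_critical_css
-- ===== SOURCE A (Python) =====
-- from typing import Dict, List, Optional, Set, Callable, Any, Tuple
--
-- def generate_critical_css(css_content: str,
--                          used_selectors: List[str]) -> str:
--     """
--     生成关键CSS
--
--     提取首屏渲染必需的CSS
--     """
--     critical_rules = []
--
--     # 简单的CSS解析（实际应使用CSS解析库）
--     rules = css_content.split("}")
--
--     for rule in rules:
--         for selector in used_selectors:
--             if selector in rule:
--                 critical_rules.append(rule + "}")
--                 break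
--
--     return "\n".join(critical_rules)
-- ===== SOURCE B (Python) =====
-- def generate_critical_css(css_content, used_selectors):
--     """生成关键CSS — multi-pattern matching: build one trie (prefix tree) of all
--     used selectors, then scan each rule once, walking the trie from every
--     position; a rule is kept as soon as the walk reaches a terminal node."""
--     trie = {}  # char -> subtrie; "" key marks end of a selector
--     for sel in used_selectors:
--         node = trie
--         for ch in sel:
--             node = node.setdefault(ch, {})
--         node[""] = True
--
--     def walk(text, j):
--         node = trie
--         while True:
--             if "" in node:
--                 return True
--             if j < len(text):
--                 nxt = node.get(text[j])
--                 if nxt is None: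
--                     return False
--                 node = nxt
--                 j += 1
--             else:
--                 return False
--
--     def hit(text):
--         return any(walk(text, i) for i in range(len(text) + 1))
--
--     out = []
--     for rule in css_content.split("}"):
--         if hit(rule):
--             out.append(rule + "}")
--     return "\n".join(out)
-- ===== Notes on version B (the rewrite author's own statement) =====
-- stated objective: alternative
-- what changed: A's per-rule loop over selectors with a substring test each is replaced by multi-pattern matching: one trie of all selectors is built up front and each rule is scanned once, walking the trie from each position until a stored selector is detected, so matching never iterates over the selector list per rule.
import Mathlib
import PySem

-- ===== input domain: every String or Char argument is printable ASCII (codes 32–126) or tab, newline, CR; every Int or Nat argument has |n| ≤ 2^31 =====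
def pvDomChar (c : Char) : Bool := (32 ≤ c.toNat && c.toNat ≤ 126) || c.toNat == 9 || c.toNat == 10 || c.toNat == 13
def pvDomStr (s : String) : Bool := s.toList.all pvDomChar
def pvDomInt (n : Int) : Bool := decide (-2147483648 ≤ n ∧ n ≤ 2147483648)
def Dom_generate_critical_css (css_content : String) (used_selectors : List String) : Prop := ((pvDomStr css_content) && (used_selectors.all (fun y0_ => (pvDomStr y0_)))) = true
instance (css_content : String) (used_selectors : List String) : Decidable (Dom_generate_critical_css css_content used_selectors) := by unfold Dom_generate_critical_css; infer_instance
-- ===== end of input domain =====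

-- B replaces A's per-rule loop of substring tests by multi-pattern matching:
-- one trie of all selectors is built once, and each rule is scanned position by
-- position, walking the trie until a stored selector is detected (alternative
-- algorithm, same result).

-- ===== PORT A =====
-- inner 'for selector in used_selectors: if selector in rule: append; break'
def pvInnerA (rule : String) (sels : List String) (acc : List String) : List String :=
  match sels with
  | [] => acc
  | s :: rest => if PySem.Str.isIn s rule then acc ++ [rule ++ "}"] else pvInnerA rule rest acc

def generate_critical_css (css_content : String) (used_selectors : List String) : String :=
  let rules := (PySem.Str.split? css_content "}").getD []
  let critical_rules := rules.foldl (fun acc rule => pvInnerA rule used_selectors acc) []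
  PySem.Str.join "\n" critical_rules

-- ===== PORT B =====
-- the Python dict-of-dicts trie ('' key = terminal) as a mutual inductive
mutual
  inductive PvTrie where
    | mk : Bool → PvChildren → PvTrie
  inductive PvChildren where
    | nil : PvChildren
    | cons : Char → PvTrie → PvChildren → PvChildren
end

def pvEmptyTrie : PvTrie := PvTrie.mk false PvChildren.nil

-- node.get(ch)
def pvGetChild : PvChildren → Char → Option PvTrie
  | PvChildren.nil, _ => none
  | PvChildren.cons d t rest, c => if c = d then some t else pvGetChild rest c

-- store/overwrite the child at c (dict insertion: in place if present, appended if new)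
def pvSetChild : PvChildren → Char → PvTrie → PvChildren
  | PvChildren.nil, c, t => PvChildren.cons c t PvChildren.nil
  | PvChildren.cons d u rest, c, t =>
      if c = d then PvChildren.cons d t rest else PvChildren.cons d u (pvSetChild rest c t)

-- the per-selector insertion loop: 'node = node.setdefault(ch, {})' down the word, then 'node[""] = True'
def pvInsert : List Char → PvTrie → PvTrie
  | [], PvTrie.mk _ ch => PvTrie.mk true ch
  | c :: rest, PvTrie.mk b ch =>
      PvTrie.mk b (pvSetChild ch c (pvInsert rest ((pvGetChild ch c).getD pvEmptyTrie)))

-- walk(text, j): the while-loop over the suffix text[j:] — terminal? then step by one char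
def pvWalk : PvTrie → List Char → Bool
  | PvTrie.mk b _, [] => b
  | PvTrie.mk b ch, c :: rest =>
      b || (pvGetChild ch c).elim false (fun t => pvWalk t rest)

-- hit(text): any(walk(text, i) for i in range(len(text)+1))
def pvHit (t : PvTrie) (text : String) : Bool :=
  (List.range (text.toList.length + 1)).any (fun i => pvWalk t (text.toList.drop i))

def generate_critical_css_alt (css_content : String) (used_selectors : List String) : String :=
  let trie := used_selectors.foldl (fun t sel => pvInsert sel.toList t) pvEmptyTrie
  let rules := (PySem.Str.split? css_content "}").getD []
  let out := rules.foldl (fun acc rule => if pvHit trie rule then acc ++ [rule ++ "}"] else acc) []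
  PySem.Str.join "\n" out

-- ===== PRECONDITION & SPEC =====
def Spec_generate_critical_css (css_content : String) (used_selectors : List String) (out : String) : Prop := out = generate_critical_css_alt css_content used_selectors
instance (css_content : String) (used_selectors : List String) (out : String) : Decidable (Spec_generate_critical_css css_content used_selectors out) := by unfold Spec_generate_critical_css; infer_instance

-- ===== CLAIM (what is proved, stated in full; the proofs are below) =====
def Claim_equal_generate_critical_css : Prop := ∀ (css_content : String) (used_selectors : List String), Dom_generate_critical_css css_content used_selectors → Spec_generate_critical_css css_content used_selectors (generate_critical_css css_content used_selectors)

-- ===== LEMMAS AND PROOFS =====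

-- A's inner loop is 'any'
theorem pvInnerA_eq (rule : String) (sels : List String) (acc : List String) :
    pvInnerA rule sels acc =
      if sels.any (fun s => PySem.Str.isIn s rule) then acc ++ [rule ++ "}"] else acc := by
  induction sels with
  | nil => simp [pvInnerA]
  | cons s rest ih =>
    simp only [pvInnerA]
    by_cases h : PySem.Str.isIn s rule = true
    · rw [if_pos h, List.any_cons, h, Bool.true_or, if_pos rfl]
    · rw [if_neg h, ih, List.any_cons, (Bool.not_eq_true _).mp h, Bool.false_or]

theorem pvWalk_empty (cs : List Char) : pvWalk pvEmptyTrie cs = false := by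
  cases cs <;> simp [pvWalk, pvEmptyTrie, pvGetChild]

theorem pvGetChild_set_self : ∀ (ch : PvChildren) (c : Char) (t : PvTrie),
    pvGetChild (pvSetChild ch c t) c = some t
  | PvChildren.nil, c, t => by simp [pvSetChild, pvGetChild]
  | PvChildren.cons d u rest, c, t => by
      by_cases h : c = d
      · simp [pvSetChild, pvGetChild, h]
      · simp [pvSetChild, pvGetChild, h, pvGetChild_set_self rest c t]

theorem pvGetChild_set_ne : ∀ (ch : PvChildren) (c d : Char) (t : PvTrie), d ≠ c →
    pvGetChild (pvSetChild ch c t) d = pvGetChild ch d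
  | PvChildren.nil, c, d, t, h => by simp [pvSetChild, pvGetChild, h]
  | PvChildren.cons e u rest, c, d, t, h => by
      by_cases hc : c = e
      · subst hc; simp [pvSetChild, pvGetChild, h]
      · simp only [pvSetChild, if_neg hc, pvGetChild]
        by_cases hd : d = e <;> simp [hd, pvGetChild_set_ne rest c d t h]

-- inserting a word adds exactly 'w is a prefix' to what the walk accepts
theorem pvWalk_insert (w : List Char) (t : PvTrie) (cs : List Char) :
    pvWalk (pvInsert w t) cs = (decide (w <+: cs) || pvWalk t cs) := by
  induction w generalizing t cs with
  | nil =>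
    obtain ⟨b, ch⟩ := t
    cases cs <;> simp [pvInsert, pvWalk]
  | cons c rest ih =>
    obtain ⟨b, ch⟩ := t
    cases cs with
    | nil => simp [pvInsert, pvWalk]
    | cons d cs' =>
      simp only [pvInsert, pvWalk]
      by_cases h : d = c
      · subst h
        rw [pvGetChild_set_self, Option.elim_some, ih]
        have hdp : decide ((d :: rest : List Char) <+: d :: cs') = decide (rest <+: cs') := by
          simp [List.cons_prefix_cons]
        rw [hdp]
        cases hg : pvGetChild ch d with
        | none => simp [pvWalk_empty, Bool.or_comm]
        | some u =>
          simp only [Option.getD_some, Option.elim_some]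
          cases decide (rest <+: cs') <;> cases b <;> simp
      · rw [pvGetChild_set_ne ch c d _ h]
        have hdp : decide ((c :: rest : List Char) <+: d :: cs') = false := by
          simp only [decide_eq_false_iff_not, List.cons_prefix_cons, not_and]
          intro hc; exact absurd hc.symm h
        rw [hdp, Bool.false_or]

-- the trie built from sels accepts exactly 'some selector is a prefix'
theorem pvWalk_build (sels : List String) (t0 : PvTrie) (cs : List Char) :
    pvWalk (sels.foldl (fun t sel => pvInsert sel.toList t) t0) cs =
      (sels.any (fun s => decide (s.toList <+: cs)) || pvWalk t0 cs) := by
  induction sels generalizing t0 with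
  | nil => simp
  | cons s rest ih =>
    simp only [List.foldl_cons, List.any_cons, ih, pvWalk_insert]
    cases decide (s.toList <+: cs) <;> simp

-- hit = some selector occurs as a substring
theorem pvHit_eq (sels : List String) (rule : String) :
    pvHit (sels.foldl (fun t sel => pvInsert sel.toList t) pvEmptyTrie) rule =
      sels.any (fun s => PySem.Str.isIn s rule) := by
  rw [Bool.eq_iff_iff]
  simp only [pvHit, List.any_eq_true, List.mem_range, pvWalk_build, pvWalk_empty, Bool.or_false,
    decide_eq_true_eq, PySem.Str.isIn_eq]
  constructor
  · rintro ⟨i, _, s, hs, hp⟩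
    exact ⟨s, hs, (PySem.Chars.exists_prefix_drop_iff_isIn _ _).mp ⟨i, hp⟩⟩
  · rintro ⟨s, hs, hin⟩
    obtain ⟨j, hj⟩ := (PySem.Chars.exists_prefix_drop_iff_isIn _ _).mpr hin
    by_cases hjl : j ≤ rule.toList.length
    · exact ⟨j, by omega, s, hs, hj⟩
    · refine ⟨rule.toList.length, by omega, s, hs, ?_⟩
      rw [List.drop_eq_nil_of_le (le_refl _)]
      rw [List.drop_eq_nil_of_le (by omega : rule.toList.length ≤ j)] at hj
      exact hj

-- the two pipelines agree
theorem pvMain (rules sels : List String) :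
    PySem.Str.join "\n" (rules.foldl (fun acc rule => pvInnerA rule sels acc) []) =
      PySem.Str.join "\n"
        (rules.foldl (fun acc rule =>
          if pvHit (sels.foldl (fun t sel => pvInsert sel.toList t) pvEmptyTrie) rule
          then acc ++ [rule ++ "}"] else acc) []) := by
  congr 1
  rw [PySem.List.foldl_congr_mem rules
    (fun acc rule => pvInnerA rule sels acc)
    (fun acc rule => if sels.any (fun s => PySem.Str.isIn s rule) then acc ++ [rule ++ "}"] else acc)
    [] (fun acc x _ => pvInnerA_eq x sels acc)]
  exact (PySem.List.foldl_congr_mem rules _ _ []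
    (fun acc x _ => by rw [pvHit_eq])).symm

-- ===== VERDICT (by name: the statement is the Claim_ definition above) =====
theorem generate_critical_css_spec : Claim_equal_generate_critical_css := by
  intro css sels _
  exact pvMain ((PySem.Str.split? css "}").getD []) sels
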